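-- pv_equiv track=rewrite | github.com/tsinghua-fib-lab/CityBench | citysim/player.py | filter_road_info
-- ===== SOURCE A (Python) =====
-- def filter_road_info(roads):
--     # 初始化一个新的字典来存储结果
--     filtered_roads = {}
--
--     # 遍历输入的字典
--     for road_id, info in roads.items():
--         road_name, direction, distance = info
--         # 创建一个复合键由road_name和direction组成
--         key = (road_name, direction)
--
--         # 如果这个复合键还没有在结果字典中，或者找到了更小的distance，则更新结果字典
--         if key not in filtered_roads or distance < filtered_roads[key][2]:
--             filtered_roads[key] = [road_name, direction, distance, road_id]
--
--     # 由于我们存储了额外的road_id，我们需要重新整理结果字典，只保留road_id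
--     result = {info[-1]: info[:-1] for info in filtered_roads.values()}
--
--     return dict(result)
-- ===== SOURCE B (Python) =====
-- def filter_road_info(roads):
--     # Group entries by (road_name, direction), then pick each group's minimum-distance entry.
--     groups = {}
--     for road_id, info in roads.items():
--         road_name, direction, distance = info
--         groups.setdefault((road_name, direction), []).append((road_id, [road_name, direction, distance]))
--     result = {}
--     for entries in groups.values():
--         road_id, info = min(entries, key=lambda e: e[1][2])
--         result[road_id] = info
--     return result
-- ===== Notes on version B (the rewrite author's own statement) =====
-- stated objective: alternative
-- what changed: A's single-pass running-minimum dict (conditional overwrite per element) is replaced by a two-pass group-then-reduce: build a dict of per-(name,direction) entry lists, then select each group's winner with min(key=distance), which keeps the first entry on ties like A's strict-< rule.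
import Mathlib
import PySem

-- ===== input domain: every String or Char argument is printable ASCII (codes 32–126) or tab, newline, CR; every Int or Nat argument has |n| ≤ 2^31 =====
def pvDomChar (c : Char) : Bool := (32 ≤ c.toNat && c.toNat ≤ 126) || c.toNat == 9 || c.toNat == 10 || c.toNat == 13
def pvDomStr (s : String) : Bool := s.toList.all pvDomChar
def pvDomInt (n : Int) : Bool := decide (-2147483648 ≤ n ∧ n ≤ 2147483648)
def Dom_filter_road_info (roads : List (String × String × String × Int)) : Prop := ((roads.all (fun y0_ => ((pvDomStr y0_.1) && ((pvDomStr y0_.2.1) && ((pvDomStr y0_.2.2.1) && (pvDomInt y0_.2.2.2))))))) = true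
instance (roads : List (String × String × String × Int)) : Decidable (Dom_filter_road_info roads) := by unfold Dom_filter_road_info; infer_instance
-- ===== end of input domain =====

-- B replaces A's single-pass running-minimum dict with a group-then-reduce two-pass (same cost); return values proved equal.


-- ===== PORT A =====
def filter_road_info (roads : List (String × String × String × Int)) : List (String × String × String × Int) :=
  -- filtered_roads: for each road (road_id = e.1, road_name = e.2.1, direction = e.2.2.1, distance = e.2.2.2),
  -- keep the running minimum under the composite key
  (PySem.Dict.values
    (roads.foldl (fun d e =>
      match d.get? (e.2.1, e.2.2.1) with
      | none => d.insert (e.2.1, e.2.2.1) (e.2.1, e.2.2.1, e.2.2.2, e.1)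
      | some cur =>
          if e.2.2.2 < cur.2.2.1 then d.insert (e.2.1, e.2.2.1) (e.2.1, e.2.2.1, e.2.2.2, e.1) else d)
      (PySem.Dict.empty : PySem.Dict (String × String) (String × String × Int × String)))
  -- result = {info[-1]: info[:-1] for info in filtered_roads.values()}
  ).foldl (fun r v => r.insert v.2.2.2 (v.1, v.2.1, v.2.2.1))
      (PySem.Dict.empty : PySem.Dict String (String × String × Int)) |>.items

-- ===== PORT B =====
def filter_road_info_alt (roads : List (String × String × String × Int)) : List (String × String × String × Int) :=
  -- groups: per composite key, the list of (road_id, [road_name, direction, distance]) entries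
  (PySem.Dict.values
    (roads.foldl (fun g e =>
      g.modify (e.2.1, e.2.2.1) [] (fun l => l ++ [(e.1, (e.2.1, e.2.2.1, e.2.2.2))]))
      (PySem.Dict.empty : PySem.Dict (String × String) (List (String × (String × String × Int)))))
  -- for each group pick min(entries, key=distance); the none branch is unreachable (groups are nonempty)
  ).foldl (fun r es =>
      match PySem.List.min? es (fun e => e.2.2.2) with
      | some w => r.insert w.1 w.2
      | none => r)
      (PySem.Dict.empty : PySem.Dict String (String × String × Int)) |>.items

-- ===== PRECONDITION & SPEC =====
def Spec_filter_road_info (roads : List (String × String × String × Int)) (out : List (String × String × String × Int)) : Prop := out = filter_road_info_alt roads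
instance (roads : List (String × String × String × Int)) (out : List (String × String × String × Int)) : Decidable (Spec_filter_road_info roads out) := by unfold Spec_filter_road_info; infer_instance

-- ===== CLAIM (what is proved, stated in full; the proofs are below) =====
def Claim_equal_filter_road_info : Prop := ∀ (roads : List (String × String × String × Int)), Dom_filter_road_info roads → Spec_filter_road_info roads (filter_road_info roads)

-- ===== LEMMAS AND PROOFS =====

-- proof-side names: a road element's composite key, B's group entry, A's stored value, A's update step
def rKey (e : String × String × String × Int) : String × String := (e.2.1, e.2.2.1)
def rPayload (e : String × String × String × Int) : String × (String × String × Int) := (e.1, (e.2.1, e.2.2.1, e.2.2.2))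
def rVal (e : String × String × String × Int) : String × String × Int × String := (e.2.1, e.2.2.1, e.2.2.2, e.1)
def rConv (w : String × (String × String × Int)) : String × String × Int × String := (w.2.1, w.2.2.1, w.2.2.2, w.1)
def rUpd (v : String × String × Int × String) (e : String × String × String × Int) : String × String × Int × String :=
  if e.2.2.2 < v.2.2.1 then rVal e else v
def stepA (d : PySem.Dict (String × String) (String × String × Int × String)) (e : String × String × String × Int) :
    PySem.Dict (String × String) (String × String × Int × String) :=
  match d.get? (rKey e) with
  | none => d.insert (rKey e) (rVal e)
  | some cur => if e.2.2.2 < cur.2.2.1 then d.insert (rKey e) (rVal e) else d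
def step1 (acc : Option (String × String × Int × String)) (e : String × String × String × Int) :
    Option (String × String × Int × String) :=
  match acc with
  | none => some (rVal e)
  | some v => some (rUpd v e)
def stepG (g : PySem.Dict (String × String) (List (String × (String × String × Int))))
    (e : String × String × String × Int) :
    PySem.Dict (String × String) (List (String × (String × String × Int))) :=
  g.modify (rKey e) [] (fun l => l ++ [rPayload e])

theorem stepA_keys (d : PySem.Dict (String × String) (String × String × Int × String)) (e : String × String × String × Int) :
    (stepA d e).keys = PySem.Set.add d.keys (rKey e) := by
  rcases hg : d.get? (rKey e) with _ | v
  · have hc : d.contains (rKey e) = false := by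
      rw [PySem.Dict.contains_eq_isSome_get?, hg]; rfl
    rw [show stepA d e = d.insert (rKey e) (rVal e) from by unfold stepA; rw [hg]]
    rw [PySem.Dict.keys_insert_of_not_contains _ _ hc]
    simp [PySem.Set.add, PySem.Set.contains, ← PySem.Dict.contains_iff_mem_keys, hc]
  · have hc : d.contains (rKey e) = true := by
      rw [PySem.Dict.contains_eq_isSome_get?, hg]; rfl
    have hadd : PySem.Set.add d.keys (rKey e) = d.keys := by
      simp [PySem.Set.add, PySem.Set.contains, ← PySem.Dict.contains_iff_mem_keys, hc]
    rw [show stepA d e = if e.2.2.2 < v.2.2.1 then d.insert (rKey e) (rVal e) else d from by unfold stepA; rw [hg]]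
    split
    · rw [PySem.Dict.keys_insert_of_contains _ _ hc, hadd]
    · rw [hadd]

theorem keysA (roads : List (String × String × String × Int))
    (d : PySem.Dict (String × String) (String × String × Int × String)) :
    (roads.foldl stepA d).keys = PySem.Set.update d.keys (roads.map rKey) := by
  induction roads generalizing d with
  | nil => simp [PySem.Set.update]
  | cons e t ih =>
      simp only [List.foldl_cons, List.map_cons, PySem.Set.update, List.foldl_cons] at *
      rw [ih, stepA_keys]

theorem getA (roads : List (String × String × String × Int))
    (d : PySem.Dict (String × String) (String × String × Int × String)) (k : String × String) :
    (roads.foldl stepA d).get? k =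
      (roads.filter (fun e => rKey e == k)).foldl step1 (d.get? k) := by
  induction roads generalizing d with
  | nil => rfl
  | cons e t ih =>
      simp only [List.foldl_cons, List.filter_cons]
      by_cases h : rKey e = k
      · subst h
        simp only [beq_self_eq_true, if_pos, List.foldl_cons]
        rw [ih]
        congr 1
        rcases hg : d.get? (rKey e) with _ | v
        · rw [show stepA d e = d.insert (rKey e) (rVal e) from by unfold stepA; rw [hg]]
          simp [PySem.Dict.get?_insert_self, step1]
        · rw [show stepA d e = if e.2.2.2 < v.2.2.1 then d.insert (rKey e) (rVal e) else d from by unfold stepA; rw [hg]]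
          simp only [step1, rUpd]
          split
          · simp [PySem.Dict.get?_insert_self]
          · simp [hg]
      · have hb : (rKey e == k) = false := by simpa using h
        rw [hb]
        simp only [if_neg Bool.false_ne_true]
        rw [ih]
        congr 1
        rcases hg : d.get? (rKey e) with _ | v
        · rw [show stepA d e = d.insert (rKey e) (rVal e) from by unfold stepA; rw [hg]]
          exact PySem.Dict.get?_insert_of_ne _ _ (fun hh => h hh.symm)
        · rw [show stepA d e = if e.2.2.2 < v.2.2.1 then d.insert (rKey e) (rVal e) else d from by unfold stepA; rw [hg]]
          split
          · exact PySem.Dict.get?_insert_of_ne _ _ (fun hh => h hh.symm)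
          · rfl

theorem foldOptSome (l : List (String × String × String × Int)) (v : String × String × Int × String) :
    l.foldl step1 (some v) = some (l.foldl rUpd v) := by
  induction l generalizing v with
  | nil => rfl
  | cons e t ih => simpa [step1] using ih (rUpd v e)

theorem min?_aux {α : Type} (key : α → Int) (t : List α) (m : α) :
    t.foldl (fun acc x => match acc with | none => some x | some m => if key x < key m then some x else some m) (some m)
      = some (t.foldl (fun acc y => if key y < key acc then y else acc) m) := by
  induction t generalizing m with
  | nil => rfl
  | cons x t ih =>
      simp only [List.foldl_cons]
      by_cases h : key x < key m <;> simp [h, ih]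

theorem min?_cons_fold {α : Type} (key : α → Int) (w : α) (t : List α) :
    PySem.List.min? (w :: t) key = some (t.foldl (fun acc y => if key y < key acc then y else acc) w) := by
  simp only [PySem.List.min?, List.foldl_cons]
  exact min?_aux key t w

theorem conv_commute (t : List (String × String × String × Int)) (w : String × (String × String × Int)) :
    rConv ((t.map rPayload).foldl (fun acc y => if y.2.2.2 < acc.2.2.2 then y else acc) w) =
      t.foldl rUpd (rConv w) := by
  induction t generalizing w with
  | nil => rfl
  | cons e t ih =>
      simp only [List.map_cons, List.foldl_cons]
      rw [ih]
      congr 1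
      by_cases h : e.2.2.2 < w.2.2.2 <;> simp [rPayload, rUpd, rConv, rVal, h]

theorem keysG (roads : List (String × String × String × Int)) :
    (roads.foldl stepG PySem.Dict.empty).keys = PySem.Set.update (PySem.Dict.empty (κ := String × String) (ν := List (String × (String × String × Int)))).keys (roads.map rKey) := by
  exact PySem.Dict.keys_foldl_modify_key roads rKey [] (fun g e => fun l => l ++ [rPayload e]) _

theorem getDG (roads : List (String × String × String × Int)) (k : String × String) :
    (roads.foldl stepG PySem.Dict.empty).getD k [] = (roads.filter (fun e => rKey e == k)).map rPayload := by
  have h1 : roads.foldl stepG PySem.Dict.empty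
      = (roads.map (fun e => (rKey e, rPayload e))).foldl (fun g p => g.modify p.1 [] (fun l => l ++ [p.2])) PySem.Dict.empty := by
    rw [List.foldl_map]; rfl
  rw [h1, PySem.Dict.getD_foldl_modify_append]
  simp [List.filter_map, Function.comp_def, rKey]

-- ===== VERDICT (by name: the statement is the Claim_ definition above) =====
theorem filter_road_info_spec : Claim_equal_filter_road_info := by
  intro roads _
  show filter_road_info roads = filter_road_info_alt roads
  unfold filter_road_info filter_road_info_alt
  have hA : (roads.foldl (fun d e =>
      let key := (e.2.1, e.2.2.1)
      match d.get? key with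
      | none => d.insert key (e.2.1, e.2.2.1, e.2.2.2, e.1)
      | some cur =>
          if e.2.2.2 < cur.2.2.1 then d.insert key (e.2.1, e.2.2.1, e.2.2.2, e.1) else d)
      PySem.Dict.empty) = roads.foldl stepA PySem.Dict.empty := rfl
  have hG : (roads.foldl (fun g e =>
      g.modify (e.2.1, e.2.2.1) [] (fun l => l ++ [(e.1, (e.2.1, e.2.2.1, e.2.2.2))]))
      PySem.Dict.empty) = roads.foldl stepG PySem.Dict.empty := rfl
  rw [hA, hG]
  set dA := roads.foldl stepA PySem.Dict.empty with hdA
  set g := roads.foldl stepG PySem.Dict.empty with hg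
  have hkeys : dA.keys = PySem.Set.ofList (roads.map rKey) := by
    rw [hdA, keysA]; rfl
  have hkeysG : g.keys = PySem.Set.ofList (roads.map rKey) := by
    rw [hg, keysG]; rfl
  have hndA : dA.keys.Nodup := by rw [hkeys]; exact PySem.Set.nodup_ofList _
  have hndG : g.keys.Nodup := by rw [hkeysG]; exact PySem.Set.nodup_ofList _
  have hvA := PySem.Dict.values_eq_map_keys dA hndA ("", "", 0, "")
  have hvG := PySem.Dict.values_eq_map_keys g hndG []
  rw [hvA, hvG, hkeys, hkeysG, List.foldl_map, List.foldl_map]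
  congr 1
  apply PySem.List.foldl_congr_mem
  intro r k hk
  have hk' : k ∈ roads.map rKey := (PySem.Set.mem_ofList _ _).mp hk
  obtain ⟨e, he, hke⟩ := List.mem_map.mp hk'
  have heF : e ∈ roads.filter (fun e => rKey e == k) := by
    rw [List.mem_filter]; exact ⟨he, by simp [hke]⟩
  obtain ⟨f, t, hft⟩ := List.exists_cons_of_ne_nil (List.ne_nil_of_mem heF)
  have hget : dA.get? k = some (t.foldl rUpd (rVal f)) := by
    rw [hdA, getA, PySem.Dict.get?_empty, hft]
    simp only [List.foldl_cons]
    rw [show step1 none f = some (rVal f) from rfl, foldOptSome]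
  have hgetD : dA.getD k ("", "", 0, "") = t.foldl rUpd (rVal f) := by
    rw [PySem.Dict.getD_eq_get?_getD, hget]; rfl
  have hgrp : g.getD k [] = rPayload f :: t.map rPayload := by
    rw [hg, getDG, hft]; rfl
  rw [hgetD, hgrp, min?_cons_fold]
  have hconv : rConv ((t.map rPayload).foldl (fun acc y => if y.2.2.2 < acc.2.2.2 then y else acc) (rPayload f))
      = t.foldl rUpd (rVal f) := by
    rw [conv_commute]; rfl
  rw [← hconv]
  rfl
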